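-- pv_equiv track=rewrite | github.com/wandb/docs | scripts/chained-redirect-detector/detect-chained-redirects.py | format_chain_output
-- ===== SOURCE A (Python) =====
-- from typing import Dict, List, Tuple
--
-- def format_chain_output(chains: List[List[str]]) -> str:
--     """Format chains for human-readable output."""
--     output = []
--
--     # Group chains by hop count
--     chains_by_hops = {}
--     for chain in chains:
--         # Calculate hops (exclude circular marker if present)
--         hops = len(chain) - 1
--         if "(CIRCULAR REDIRECT!)" in chain:
--             hops -= 1
--
--         if hops not in chains_by_hops:
--             chains_by_hops[hops] = []
--         chains_by_hops[hops].append(chain)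
--
--     # Sort by hop count (longest first)
--     for hops in sorted(chains_by_hops.keys(), reverse=True):
--         chains_list = chains_by_hops[hops]
--         output.append(f"\n{'='*80}")
--         output.append(f"{len(chains_list)} chain(s) with {hops} hop(s):")
--         output.append('='*80)
--
--         for i, chain in enumerate(chains_list, 1):
--             output.append(f"\n{i}.")
--             for j, step in enumerate(chain):
--                 if step == "(CIRCULAR REDIRECT!)":
--                     output.append(f"   {'   ' * j}⚠️  {step}")
--                 else:
--                     indent = '   ' * j
--                     arrow = '→' if j > 0 else ' '
--                     output.append(f"   {indent}{arrow} {step}")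
--
--     return '\n'.join(output)
-- ===== SOURCE B (Python) =====
-- def format_chain_output(chains):
--     """Format chains for human-readable output."""
--     marker = "(CIRCULAR REDIRECT!)"
--
--     def hops_of(c):
--         return len(c) - 1 - (marker in c)
--
--     def step_line(j, step):
--         pad = "   " + "   " * j
--         if step == marker:
--             return pad + "\u26a0\ufe0f  " + step
--         return pad + ("\u2192" if j > 0 else " ") + " " + step
--
--     def chain_lines(i, c):
--         return ["\n" + str(i) + "."] + [step_line(j, s) for j, s in enumerate(c)]
--
--     keys = sorted({hops_of(c) for c in chains}, reverse=True)
--     lines = []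
--     for h in keys:
--         group = [c for c in chains if hops_of(c) == h]
--         lines += ["\n" + "=" * 80,
--                   str(len(group)) + " chain(s) with " + str(h) + " hop(s):",
--                   "=" * 80]
--         for i, c in enumerate(group, 1):
--             lines += chain_lines(i, c)
--     return "\n".join(lines)
-- ===== Notes on version B (the rewrite author's own statement) =====
-- stated objective: alternative
-- what changed: Replaces A's dict-bucketing (build a hop->chains dict in one pass, then iterate its sorted keys) by a set-and-filter decomposition: compute the sorted distinct hop counts and select each group with a filter over the input, with the per-line formatting factored into helper functions.
import Mathlib
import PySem

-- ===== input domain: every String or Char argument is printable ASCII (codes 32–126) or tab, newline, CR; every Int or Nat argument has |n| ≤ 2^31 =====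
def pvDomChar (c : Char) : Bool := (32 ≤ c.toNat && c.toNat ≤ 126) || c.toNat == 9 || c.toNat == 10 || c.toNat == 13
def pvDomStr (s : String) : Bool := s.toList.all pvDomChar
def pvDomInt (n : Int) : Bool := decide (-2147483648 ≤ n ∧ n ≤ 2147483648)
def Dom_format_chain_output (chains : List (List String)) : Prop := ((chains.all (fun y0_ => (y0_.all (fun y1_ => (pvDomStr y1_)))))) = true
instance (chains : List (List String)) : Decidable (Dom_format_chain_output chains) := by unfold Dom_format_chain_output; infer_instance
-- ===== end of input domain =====

-- B replaces A's dict-bucketing by sorted-distinct-hop-counts + a filter per hop count (alternative decomposition, same output).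

-- ===== PORT A =====
-- literal transliteration of A: one pass building a hop->chains dict, then a foldl
-- over the sorted keys (reverse=True) appending lines to `output`.
def format_chain_output (chains : List (List String)) : String :=
  let d : PySem.Dict Int (List (List String)) :=
    chains.foldl (fun d chain =>
      let hops0 : Int := (chain.length : Int) - 1
      let hops : Int := if chain.contains "(CIRCULAR REDIRECT!)" then hops0 - 1 else hops0
      let d' := if d.contains hops then d else d.insert hops []
      d'.modify hops [] (fun l => l ++ [chain])) PySem.Dict.empty
  let output : List String :=
    (PySem.List.sorted d.keys (fun k => k) true).foldl (fun output hops =>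
      -- Python `chains_by_hops[hops]`: the key is always present (it comes from d.keys), so getD is exact
      let chainsList := d.getD hops []
      let output := output ++ ["\n" ++ String.ofList (PySem.List.pyRepeat ['='] 80)]
      let output := output ++ [PySem.Int.toStr (chainsList.length : Int) ++ " chain(s) with " ++ PySem.Int.toStr hops ++ " hop(s):"]
      let output := output ++ [String.ofList (PySem.List.pyRepeat ['='] 80)]
      (PySem.List.enumerate chainsList 1).foldl (fun output ic =>
        let output := output ++ ["\n" ++ PySem.Int.toStr ic.1 ++ "."]
        (PySem.List.enumerate ic.2 0).foldl (fun output js =>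
          if js.2 = "(CIRCULAR REDIRECT!)" then
            output ++ ["   " ++ String.ofList (PySem.List.pyRepeat "   ".toList js.1) ++ "⚠️  " ++ js.2]
          else
            output ++ ["   " ++ String.ofList (PySem.List.pyRepeat "   ".toList js.1) ++ (if js.1 > 0 then "→" else " ") ++ " " ++ js.2])
          output) output) []
  PySem.Str.join "\n" output

-- ===== PORT B =====
def pvHopsOf (c : List String) : Int :=
  (c.length : Int) - 1 - (if c.contains "(CIRCULAR REDIRECT!)" then 1 else 0)

def pvStepLine (j : Int) (step : String) : String :=
  let pad := "   " ++ String.ofList (PySem.List.pyRepeat "   ".toList j)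
  if step = "(CIRCULAR REDIRECT!)" then pad ++ "⚠️  " ++ step
  else pad ++ (if j > 0 then "→" else " ") ++ " " ++ step

def pvChainLines (i : Int) (c : List String) : List String :=
  ("\n" ++ PySem.Int.toStr i ++ ".") :: (PySem.List.enumerate c 0).map (fun js => pvStepLine js.1 js.2)

def format_chain_output_alt (chains : List (List String)) : String :=
  let keys := PySem.List.sorted (PySem.Set.ofList (chains.map pvHopsOf)) (fun k => k) true
  let lines : List String :=
    keys.foldl (fun lines h =>
      let group := chains.filter (fun c => pvHopsOf c == h)
      let lines := lines ++
        ["\n" ++ String.ofList (PySem.List.pyRepeat ['='] 80),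
         PySem.Int.toStr (group.length : Int) ++ " chain(s) with " ++ PySem.Int.toStr h ++ " hop(s):",
         String.ofList (PySem.List.pyRepeat ['='] 80)]
      (PySem.List.enumerate group 1).foldl (fun lines ic => lines ++ pvChainLines ic.1 ic.2) lines) []
  PySem.Str.join "\n" lines

-- ===== PRECONDITION & SPEC =====
def Spec_format_chain_output (chains : List (List String)) (out : String) : Prop := out = format_chain_output_alt chains
instance (chains : List (List String)) (out : String) : Decidable (Spec_format_chain_output chains out) := by unfold Spec_format_chain_output; infer_instance

-- ===== CLAIM (what is proved, stated in full; the proofs are below) =====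
def Claim_equal_format_chain_output : Prop := ∀ (chains : List (List String)), Dom_format_chain_output chains → Spec_format_chain_output chains (format_chain_output chains)


-- ===== LEMMAS AND PROOFS =====

-- A's two-step "ensure key, then append" equals a single Python d[k] = d.get(k, []) + [chain] update
theorem pv_dict_step (d : PySem.Dict Int (List (List String))) (k : Int)
    (f : List (List String) → List (List String)) :
    ((if d.contains k then d else d.insert k []).modify k [] f) = d.modify k [] f := by
  by_cases hc : d.contains k = true
  · simp [hc]
  · have hc' : d.contains k = false := by simpa using hc
    have h3 : (d.insert k []).getD k ([] : List (List String)) = [] :=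
      PySem.Dict.getD_insert_self d k [] []
    have h4 : d.getD k ([] : List (List String)) = [] :=
      PySem.Dict.getD_of_not_contains d [] hc'
    simp only [hc', Bool.false_eq_true, if_false, PySem.Dict.modify, h4]
    rw [h3, PySem.Dict.insert_insert_self]

theorem pv_hops_eq (c : List String) :
    (if c.contains "(CIRCULAR REDIRECT!)" then ((c.length : Int) - 1) - 1 else ((c.length : Int) - 1))
      = pvHopsOf c := by
  unfold pvHopsOf; split <;> ring

theorem pv_dict_eq (chains : List (List String)) :
    chains.foldl (fun d chain =>
      let hops0 : Int := (chain.length : Int) - 1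
      let hops : Int := if chain.contains "(CIRCULAR REDIRECT!)" then hops0 - 1 else hops0
      let d' := if d.contains hops then d else d.insert hops []
      d'.modify hops [] (fun l => l ++ [chain])) PySem.Dict.empty
    = chains.foldl (fun d c => d.modify (pvHopsOf c) [] (fun l => l ++ [c])) PySem.Dict.empty := by
  apply PySem.List.foldl_congr_mem
  intro d c _
  simp only [pv_hops_eq]
  exact pv_dict_step d (pvHopsOf c) _

theorem pv_keys_eq (chains : List (List String)) :
    (chains.foldl (fun d c => d.modify (pvHopsOf c) [] (fun l => l ++ [c])) PySem.Dict.empty).keys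
      = PySem.Set.ofList (chains.map pvHopsOf) := by
  rw [PySem.Dict.keys_foldl_modify_key]
  simp [PySem.Dict.keys_empty, PySem.Set.update, PySem.Set.ofList_eq_foldl]

theorem pv_getD_eq (chains : List (List String)) (k : Int) :
    (chains.foldl (fun d c => d.modify (pvHopsOf c) [] (fun l => l ++ [c])) PySem.Dict.empty).getD k []
      = chains.filter (fun c => pvHopsOf c == k) := by
  have hm : chains.foldl (fun d c => d.modify (pvHopsOf c) [] (fun l => l ++ [c])) PySem.Dict.empty
      = (chains.map (fun c => (pvHopsOf c, c))).foldl
          (fun d p => d.modify p.1 [] (fun l => l ++ [p.2])) PySem.Dict.empty := by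
    rw [List.foldl_map]
  rw [hm, PySem.Dict.getD_foldl_modify_append]
  simp [List.filter_map, Function.comp_def, List.map_map]

theorem pv_inner_fold (c : List String) (acc : List String) :
    (PySem.List.enumerate c 0).foldl (fun out js =>
        if js.2 = "(CIRCULAR REDIRECT!)" then
          out ++ ["   " ++ String.ofList (PySem.List.pyRepeat "   ".toList js.1) ++ "⚠️  " ++ js.2]
        else
          out ++ ["   " ++ String.ofList (PySem.List.pyRepeat "   ".toList js.1) ++ (if js.1 > 0 then "→" else " ") ++ " " ++ js.2]) acc
      = acc ++ (PySem.List.enumerate c 0).map (fun js => pvStepLine js.1 js.2) := by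
  have h : (fun (out : List String) (js : Int × String) =>
        if js.2 = "(CIRCULAR REDIRECT!)" then
          out ++ ["   " ++ String.ofList (PySem.List.pyRepeat "   ".toList js.1) ++ "⚠️  " ++ js.2]
        else
          out ++ ["   " ++ String.ofList (PySem.List.pyRepeat "   ".toList js.1) ++ (if js.1 > 0 then "→" else " ") ++ " " ++ js.2])
      = (fun out js => out ++ [pvStepLine js.1 js.2]) := by
    funext out js
    unfold pvStepLine
    split <;> rfl
  rw [h, PySem.List.foldl_append_singleton_eq_map]

theorem pv_mid_fold (group : List (List String)) (acc : List String) :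
    (PySem.List.enumerate group 1).foldl (fun out ic =>
        (PySem.List.enumerate ic.2 0).foldl (fun out js =>
          if js.2 = "(CIRCULAR REDIRECT!)" then
            out ++ ["   " ++ String.ofList (PySem.List.pyRepeat "   ".toList js.1) ++ "⚠️  " ++ js.2]
          else
            out ++ ["   " ++ String.ofList (PySem.List.pyRepeat "   ".toList js.1) ++ (if js.1 > 0 then "→" else " ") ++ " " ++ js.2])
          (out ++ ["\n" ++ PySem.Int.toStr ic.1 ++ "."])) acc
      = acc ++ (PySem.List.enumerate group 1).flatMap (fun ic => pvChainLines ic.1 ic.2) := by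
  have h : ∀ (out : List String) (ic : Int × List String),
      (PySem.List.enumerate ic.2 0).foldl (fun out js =>
          if js.2 = "(CIRCULAR REDIRECT!)" then
            out ++ ["   " ++ String.ofList (PySem.List.pyRepeat "   ".toList js.1) ++ "⚠️  " ++ js.2]
          else
            out ++ ["   " ++ String.ofList (PySem.List.pyRepeat "   ".toList js.1) ++ (if js.1 > 0 then "→" else " ") ++ " " ++ js.2])
          (out ++ ["\n" ++ PySem.Int.toStr ic.1 ++ "."])
      = out ++ pvChainLines ic.1 ic.2 := by
    intro out ic
    rw [pv_inner_fold]
    unfold pvChainLines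
    simp
  simp only [h]
  exact PySem.List.foldl_append_eq_flatMap _ _ _

-- ===== VERDICT (by name: the statement is the Claim_ definition above) =====
theorem format_chain_output_spec : Claim_equal_format_chain_output := by
  intro chains _
  unfold Spec_format_chain_output
  simp only [format_chain_output, format_chain_output_alt]
  rw [pv_dict_eq]
  congr 1
  rw [pv_keys_eq]
  apply PySem.List.foldl_congr_mem
  intro out k _
  rw [pv_getD_eq, pv_mid_fold]
  have hB : (PySem.List.enumerate (chains.filter (fun c => pvHopsOf c == k)) 1).foldl
      (fun lines ic => lines ++ pvChainLines ic.1 ic.2)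
      (out ++ ["\n" ++ String.ofList (PySem.List.pyRepeat ['='] 80),
        PySem.Int.toStr ((chains.filter (fun c => pvHopsOf c == k)).length : Int) ++ " chain(s) with " ++ PySem.Int.toStr k ++ " hop(s):",
        String.ofList (PySem.List.pyRepeat ['='] 80)])
      = (out ++ ["\n" ++ String.ofList (PySem.List.pyRepeat ['='] 80),
        PySem.Int.toStr ((chains.filter (fun c => pvHopsOf c == k)).length : Int) ++ " chain(s) with " ++ PySem.Int.toStr k ++ " hop(s):",
        String.ofList (PySem.List.pyRepeat ['='] 80)])
        ++ (PySem.List.enumerate (chains.filter (fun c => pvHopsOf c == k)) 1).flatMap (fun ic => pvChainLines ic.1 ic.2) :=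
    PySem.List.foldl_append_eq_flatMap _ _ _
  rw [hB]
  simp
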